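-- pv_equiv track=rewrite | github.com/Falkor17ER/Automation-of-spectral-measurements | Code Files/Operator.py | getReps
-- ===== SOURCE A (Python) =====
-- def getReps(values):
--     # returns all the reptition rate keys that are checked True
--     rep_keys = ["r"+str(k) for k in range(1,41,1)]
--     reps = []
--     for rep_key in rep_keys:
--         try:
--             if values[rep_key]:
--                 # Key exists and value is True
--                 reps.append(int(rep_key[1:]))
--         except:
--             continue
--     return reps
-- ===== SOURCE B (Python) =====
-- def getReps(values):
--     # single pass over the dict items, then one ascending sort
--     rep_set = {"r" + str(k) for k in range(1, 41)}
--     reps = []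
--     for key, val in values.items():
--         if key in rep_set and val:
--             reps.append(int(key[1:]))
--     return sorted(reps)
-- ===== Notes on version B (the rewrite author's own statement) =====
-- stated objective: idiomatic
-- what changed: Instead of probing the dict 40 times with fixed keys under try/except, B builds the set of valid rep-keys once, scans the dict items in a single pass collecting the checked numbers, and sorts them ascending; the try/except disappears.
import Mathlib
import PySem

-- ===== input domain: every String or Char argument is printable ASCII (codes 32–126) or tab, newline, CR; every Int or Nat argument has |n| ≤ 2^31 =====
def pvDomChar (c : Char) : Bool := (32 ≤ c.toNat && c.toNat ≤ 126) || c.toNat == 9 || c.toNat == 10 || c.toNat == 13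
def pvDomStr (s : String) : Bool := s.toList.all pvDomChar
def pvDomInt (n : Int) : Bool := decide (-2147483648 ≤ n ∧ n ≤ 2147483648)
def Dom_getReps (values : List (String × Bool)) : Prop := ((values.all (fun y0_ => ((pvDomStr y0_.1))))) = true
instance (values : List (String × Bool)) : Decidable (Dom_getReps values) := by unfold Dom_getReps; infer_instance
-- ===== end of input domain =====

-- B replaces A's 40 guarded key probes by one set-guarded pass over the dict items plus an ascending sort (idiomatic).


-- ===== PORT A =====
def getReps (values : List (String × Bool)) : List Int :=
  let rep_keys := (PySem.List.pyRange 1 41 1).map (fun k => "r" ++ PySem.Int.toStr k)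
  rep_keys.foldl (fun reps rep_key =>
    match (PySem.Dict.mk values).get? rep_key with
    | some v =>
      if v then
        match PySem.Int.ofStr? (PySem.Str.slice rep_key (some 1) none) with
        | some n => reps ++ [n]
        | none => reps        -- exception inside try → continue
      else reps
    | none => reps            -- KeyError → except: continue
    ) []

-- ===== PORT B =====
def getReps_alt (values : List (String × Bool)) : List Int :=
  let repSet : PySem.Set String :=
    PySem.Set.ofList ((PySem.List.pyRange 1 41 1).map (fun k => "r" ++ PySem.Int.toStr k))
  let reps := values.foldl (fun acc kv =>
    if PySem.Set.contains repSet kv.1 && kv.2 then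
      -- int(key[1:]) always succeeds here: key ∈ repSet, so key[1:] is a decimal numeral
      acc ++ [(PySem.Int.ofStr? (PySem.Str.slice kv.1 (some 1) none)).getD 0]
    else acc) []
  PySem.List.sorted reps (fun x => x) false

-- ===== PRECONDITION & SPEC =====
-- Pre_ excludes association lists with duplicate keys: they do not represent any Python dict
-- (A's input is a dict, whose keys are unique), so first-match lookup order there is a
-- representation artefact.
def Pre_getReps (values : List (String × Bool)) : Prop := (values.map Prod.fst).Nodup
instance (values : List (String × Bool)) : Decidable (Pre_getReps values) := by
  unfold Pre_getReps; infer_instance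
def pvWitness_getReps : (List (String × Bool)) := [("r2", true), ("x", false), ("r40", true)]
def Spec_getReps (values : List (String × Bool)) (out : List Int) : Prop := out = getReps_alt values
instance (values : List (String × Bool)) (out : List Int) : Decidable (Spec_getReps values out) := by unfold Spec_getReps; infer_instance

-- ===== CLAIM (what is proved, stated in full; the proofs are below) =====
def Claim_equal_getReps : Prop := ∀ (values : List (String × Bool)), Dom_getReps values → Pre_getReps values → Spec_getReps values (getReps values)

-- ===== LEMMAS AND PROOFS =====

-- abbreviations used only by the proofs
def pvK (n : Int) : String := "r" ++ PySem.Int.toStr n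
def pvParse (s : String) : Option Int := PySem.Int.ofStr? (PySem.Str.slice s (some 1) none)
def pvRepSet : PySem.Set String := PySem.Set.ofList ((PySem.List.pyRange 1 41 1).map (fun k => "r" ++ PySem.Int.toStr k))
def pvQ (kv : String × Bool) : Bool := PySem.Set.contains pvRepSet kv.1 && kv.2
def pvLA (values : List (String × Bool)) : List Int :=
  (PySem.List.pyRange 1 41 1).filter (fun n => (PySem.Dict.mk values).get? (pvK n) == some true)
def pvLB (values : List (String × Bool)) : List Int :=
  (values.filter pvQ).map (fun kv => (pvParse kv.1).getD 0)

lemma pvParse_K : ∀ n ∈ PySem.List.pyRange 1 41 1, pvParse (pvK n) = some n := by decide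

lemma pv_mem_repSet {s : String} :
    PySem.Set.contains pvRepSet s = true ↔ ∃ n ∈ PySem.List.pyRange 1 41 1, s = pvK n := by
  simp [pvRepSet, PySem.Set.contains, PySem.Set.mem_ofList, pvK, eq_comm]

lemma pvA_eq (values : List (String × Bool)) : getReps values = pvLA values := by
  unfold getReps pvLA
  rw [List.foldl_map]
  rw [PySem.List.foldl_congr_mem _ _
    (fun (acc : List Int) (n : Int) =>
      if ((PySem.Dict.mk values).get? (pvK n) == some true) = true then acc ++ [n] else acc) _
    ?_]
  · rw [PySem.List.foldl_append_if (fun n => (PySem.Dict.mk values).get? (pvK n) == some true)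
        (fun (n : Int) => n)]
    simp
  · intro acc n hn
    have hp := pvParse_K n hn
    simp only [pvParse, pvK] at hp
    rcases h : (PySem.Dict.mk values).get? (pvK n) with _ | v
    · simp only [pvK] at h; rw [h]; simp [pvK, h]
    · cases v
      · simp only [pvK] at h; rw [h]; simp [pvK, h]
      · simp only [pvK] at h; rw [h, hp]; simp [pvK, h]

lemma pvB_eq (values : List (String × Bool)) :
    getReps_alt values = PySem.List.sorted (pvLB values) (fun x => x) false := by
  unfold getReps_alt pvLB
  simp only [PySem.List.foldl_append_if]
  rfl

lemma pvLA_pairwise (values : List (String × Bool)) :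
    List.Pairwise (fun a b => a < b) (pvLA values) :=
  (PySem.List.pairwise_lt_pyRange_one 1 41).filter _

lemma pvLB_keys_nodup (values : List (String × Bool)) (hpre : (values.map Prod.fst).Nodup) :
    ((values.filter pvQ).map Prod.fst).Nodup :=
  hpre.sublist ((List.filter_sublist).map Prod.fst)

lemma pvLA_perm (values : List (String × Bool)) (hpre : (values.map Prod.fst).Nodup) :
    (pvLA values).Perm (pvLB values) := by
  have hkeys : ((values.filter pvQ).map Prod.fst).Nodup := pvLB_keys_nodup values hpre
  have hval : ∀ kv ∈ values.filter pvQ, ∃ n ∈ PySem.List.pyRange 1 41 1,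
      kv.1 = pvK n ∧ (pvParse kv.1).getD 0 = n ∧ kv.2 = true := by
    intro kv hkv
    have hq := List.of_mem_filter hkv
    simp only [pvQ, Bool.and_eq_true] at hq
    obtain ⟨n, hn, hs⟩ := pv_mem_repSet.mp hq.1
    exact ⟨n, hn, hs, by rw [hs, pvParse_K n hn]; rfl, hq.2⟩
  have hnodupB : (pvLB values).Nodup := by
    refine List.Nodup.map_on ?_ (hkeys.of_map)
    intro x hx y hy hxy
    obtain ⟨n, hn, hxs, hxv, -⟩ := hval x hx
    obtain ⟨m, hm, hys, hyv, -⟩ := hval y hy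
    have : x.1 = y.1 := by rw [hxs, hys]; rw [hxv, hyv] at hxy; rw [hxy]
    exact List.inj_on_of_nodup_map hkeys hx hy this
  have hnodupA : (pvLA values).Nodup := (PySem.List.nodup_pyRange_one 1 41).filter _
  refine (List.perm_ext_iff_of_nodup hnodupA hnodupB).mpr ?_
  intro a
  constructor
  · intro ha
    have hmem := List.mem_of_mem_filter ha
    have hget : (PySem.Dict.mk values).get? (pvK a) = some true := by
      have := List.of_mem_filter ha; simpa using this
    have hin : (pvK a, true) ∈ values :=
      PySem.Dict.mem_items_of_get?_eq_some (PySem.Dict.mk values) hget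
    have hq : pvQ (pvK a, true) = true := by
      simp only [pvQ, Bool.and_true]
      exact pv_mem_repSet.mpr ⟨a, hmem, rfl⟩
    refine List.mem_map.mpr ⟨(pvK a, true), List.mem_filter.mpr ⟨hin, hq⟩, ?_⟩
    rw [show ((pvK a, true) : String × Bool).1 = pvK a from rfl, pvParse_K a hmem]; rfl
  · intro ha
    obtain ⟨kv, hkv, hv⟩ := List.mem_map.mp ha
    obtain ⟨n, hn, hs, hval0, htrue⟩ := hval kv hkv
    have hna : n = a := by rw [← hv, hval0]
    subst hna
    have hkv' : (pvK n, true) ∈ values := by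
      have : kv = (pvK n, true) := Prod.ext hs htrue
      rw [← this]; exact List.mem_of_mem_filter hkv
    have hget : (PySem.Dict.mk values).get? (pvK n) = some true :=
      PySem.Dict.get?_of_mem_items (PySem.Dict.mk values) hkv'
        (by simpa [PySem.Dict.keys] using hpre)
    exact List.mem_filter.mpr ⟨hn, by simp [hget]⟩

-- ===== VERDICT (by name: the statement is the Claim_ definition above) =====
theorem getReps_spec : Claim_equal_getReps := by
  intro values _ hpre
  unfold Spec_getReps
  rw [pvA_eq, pvB_eq]
  exact (PySem.List.sorted_eq_of_perm_of_pairwise_lt (pvLB values) (pvLA values) (fun x => x)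
    (pvLA_perm values hpre) (pvLA_pairwise values)).symm
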